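-- pv_equiv track=rewrite | github.com/Ghassenboussalem/OddoBhfComplianceCheck | tools/registration_tools.py | extract_mention_context
-- ===== SOURCE A (Python) =====
-- from typing import Dict, Optional, List, Set, Tuple
--
-- def extract_mention_context(doc_text: str, country: str, context_chars: int = 500) -> List[str]:
--     """
--     Extract text around country mention for context analysis.
--
--     Args:
--         doc_text: Full document text
--         country: Country name to find
--         context_chars: Number of characters to include before/after mention
--
--     Returns:
--         List of context strings (one per mention)
--     """
--     doc_lower = doc_text.lower()
--     country_lower = country.lower()
--
--     contexts = []
--     start = 0
--
--     while True:
--         pos = doc_lower.find(country_lower, start)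
--         if pos == -1:
--             break
--
--         context_start = max(0, pos - context_chars)
--         context_end = min(len(doc_text), pos + len(country) + context_chars)
--         context = doc_text[context_start:context_end]
--         contexts.append(context)
--
--         start = pos + 1
--
--     return contexts
-- ===== SOURCE B (Python) =====
-- def extract_mention_context(doc_text: str, country: str, context_chars: int = 500):
--     """Same result as A: one pass collecting all (overlapping) match positions
--     with startswith, then slice contexts from the original text."""
--     doc_lower = doc_text.lower()
--     country_lower = country.lower()
--     n = len(doc_text)
--     positions = [i for i in range(n + 1) if doc_lower.startswith(country_lower, i)]
--     return [doc_text[max(0, i - context_chars):min(n, i + len(country) + context_chars)]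
--             for i in positions]
-- ===== Notes on version B (the rewrite author's own statement) =====
-- stated objective: idiomatic
-- what changed: Replaces A's stateful while-loop of repeated str.find(country, start) calls with a single comprehension that collects every (overlapping) match position via str.startswith over range(len+1), then slices the contexts in a second comprehension.
import Mathlib
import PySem

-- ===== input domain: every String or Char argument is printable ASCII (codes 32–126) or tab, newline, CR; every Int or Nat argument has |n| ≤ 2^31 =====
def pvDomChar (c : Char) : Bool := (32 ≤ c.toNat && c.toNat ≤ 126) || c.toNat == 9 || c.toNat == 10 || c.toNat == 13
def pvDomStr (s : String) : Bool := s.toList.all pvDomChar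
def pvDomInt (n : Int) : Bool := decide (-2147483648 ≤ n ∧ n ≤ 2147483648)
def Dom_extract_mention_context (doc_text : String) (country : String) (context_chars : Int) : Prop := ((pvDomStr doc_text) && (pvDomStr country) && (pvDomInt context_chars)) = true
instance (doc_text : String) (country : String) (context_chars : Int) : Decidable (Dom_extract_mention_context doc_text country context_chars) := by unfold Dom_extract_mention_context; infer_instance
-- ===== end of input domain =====

-- B replaces A's repeated `str.find`-from-`pos+1` while-loop by a single comprehension
-- collecting every (overlapping) match position with `startswith`, then slicing; return
-- value only, no mutation; objective: idiomatic/alternative, not claimed faster.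

-- ===== PORT A =====
-- A's while-loop: find next occurrence from `start`, emit a context slice, resume at pos+1.
-- `fuel` only bounds the recursion (the loop runs at most length+2 iterations); it never
-- changes the computed value for the fuel A's wrapper supplies.
def emcLoopA (docL dl cl : List Char) (clen : Nat) (cc : Int) (fuel : Nat) (start : Int) : List String :=
  match fuel with
  | 0 => []
  | fuel + 1 =>
    let pos := PySem.Chars.findFrom dl cl start none
    if pos = -1 then []
    else
      let cs := max 0 (pos - cc)
      let ce := min (docL.length : Int) (pos + (clen : Int) + cc)
      String.ofList (PySem.List.slice docL (some cs) (some ce)) ::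
        emcLoopA docL dl cl clen cc fuel (pos + 1)

def extract_mention_context (doc_text : String) (country : String) (context_chars : Int) : List String :=
  let docL := doc_text.toList
  let dl := PySem.Chars.lower docL
  let cl := PySem.Chars.lower country.toList
  emcLoopA docL dl cl country.toList.length context_chars (docL.length + 2) 0

-- ===== PORT B =====
-- Source B: positions = [i for i in range(n+1) if doc_lower.startswith(country_lower, i)];
-- `s.startswith(p, i)` for 0 ≤ i ≤ len(s) is exactly `p` being a prefix of `s[i:]`,
-- ported as PySem.Chars.startswith (dl.drop i.toNat) cl.
def extract_mention_context_alt (doc_text : String) (country : String) (context_chars : Int) : List String :=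
  let docL := doc_text.toList
  let dl := PySem.Chars.lower docL
  let cl := PySem.Chars.lower country.toList
  let n := docL.length
  let positions := (PySem.List.pyRange 0 ((n : Int) + 1) 1).filter
      (fun i => PySem.Chars.startswith (dl.drop i.toNat) cl)
  positions.map (fun i =>
    String.ofList (PySem.List.slice docL (some (max 0 (i - context_chars)))
      (some (min (n : Int) (i + (country.toList.length : Int) + context_chars)))))

-- ===== PRECONDITION & SPEC =====
def Spec_extract_mention_context (doc_text : String) (country : String) (context_chars : Int) (out : List String) : Prop := out = extract_mention_context_alt doc_text country context_chars
instance (doc_text : String) (country : String) (context_chars : Int) (out : List String) : Decidable (Spec_extract_mention_context doc_text country context_chars out) := by unfold Spec_extract_mention_context; infer_instance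

-- ===== CLAIM (what is proved, stated in full; the proofs are below) =====
def Claim_equal_extract_mention_context : Prop := ∀ (doc_text : String) (country : String) (context_chars : Int), Dom_extract_mention_context doc_text country context_chars → Spec_extract_mention_context doc_text country context_chars (extract_mention_context doc_text country context_chars)

-- ===== LEMMAS AND PROOFS =====

-- CPython quirk: find with a start just past the end returns -1 even for the empty pattern.
lemma emc_findFrom_past (s sub : List Char) :
    PySem.Chars.findFrom s sub ((s.length : Int) + 1) none = -1 := by
  simp [PySem.Chars.findFrom]
  omega

-- a prefix somewhere at or beyond `start` is an infix of the drop at `start`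
lemma emc_prefix_drop_infix (cl l : List Char) (start i : Nat) (hsi : start ≤ i)
    (h : cl <+: l.drop i) : cl <:+: l.drop start := by
  have : l.drop i = (l.drop start).drop (i - start) := by
    rw [List.drop_drop]; congr 1; omega
  rw [this] at h
  exact h.isInfix.trans (List.drop_suffix _ _).isInfix

lemma emcLoopA_eq (docL dl cl : List Char) (clen : Nat) (cc : Int)
    (hdl : dl.length = docL.length) (fuel start : Nat)
    (hstart : start ≤ docL.length + 1) (hfuel : docL.length + 2 - start ≤ fuel) :
    emcLoopA docL dl cl clen cc fuel (start : Int) =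
      ((PySem.List.pyRange (start : Int) ((docL.length : Int) + 1) 1).filter
          (fun i => PySem.Chars.startswith (dl.drop i.toNat) cl)).map
        (fun i => String.ofList (PySem.List.slice docL (some (max 0 (i - cc)))
          (some (min ((docL.length : Int)) (i + (clen : Int) + cc))))) := by
  induction fuel generalizing start with
  | zero => omega
  | succ fuel ih =>
    by_cases hpast : start = docL.length + 1
    · subst hpast
      have hf : PySem.Chars.findFrom dl cl ((docL.length : Int) + 1) none = -1 := by
        rw [← hdl]; exact_mod_cast emc_findFrom_past dl cl
      rw [emcLoopA, PySem.List.pyRange_one_eq_nil (by push_cast; omega)]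
      simp [hf]
    · have hsn : start ≤ docL.length := by omega
      have hsdl : start ≤ dl.length := by omega
      rw [emcLoopA]
      by_cases hneg : PySem.Chars.findFrom dl cl (start : Int) none = -1
      · have hnoin : ¬ cl <:+: dl.drop start :=
          (PySem.Chars.findFrom_natCast_eq_neg_one_iff dl cl start hsdl).mp hneg
        have hfilt : (PySem.List.pyRange (start : Int) ((docL.length : Int) + 1) 1).filter
            (fun i => PySem.Chars.startswith (dl.drop i.toNat) cl) = [] := by
          rw [List.filter_eq_nil_iff]
          intro i hi
          have hmem := PySem.List.mem_pyRange_one.mp hi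
          rw [PySem.Chars.startswith_iff]
          intro hpre
          exact hnoin (emc_prefix_drop_infix cl dl start i.toNat (by omega) hpre)
        simp [hneg, hfilt]
      · obtain ⟨hge, hpre, hmin⟩ :=
          PySem.Chars.findFrom_natCast_spec dl cl start hsdl hneg
        set pos := PySem.Chars.findFrom dl cl (start : Int) none with hposdef
        have hpos0 : 0 ≤ pos := le_trans (by exact_mod_cast Nat.zero_le start) hge
        have hposle : pos ≤ (docL.length : Int) := by
          by_cases hcl : cl = []
          · subst hcl
            have h2 := PySem.Chars.findFrom_natCast dl [] start hsdl
            rw [PySem.Chars.find_nil] at h2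
            simp at h2
            rw [← hposdef] at h2
            omega
          · have hlen := hpre.length_le
            have hcl1 : 1 ≤ cl.length := by
              cases cl with
              | nil => exact absurd rfl hcl
              | cons a t => simp
            rw [List.length_drop] at hlen
            omega
        have hposn : pos.toNat ≤ docL.length := by omega
        rw [if_neg hneg]
        rw [PySem.List.pyRange_one_append (start : Int) pos ((docL.length : Int) + 1)
              hge (by omega),
            PySem.List.pyRange_one_cons (by omega : pos < (docL.length : Int) + 1)]
        rw [List.filter_append, List.filter_cons]
        have hfilt1 : (PySem.List.pyRange (start : Int) pos 1).filter
            (fun i => PySem.Chars.startswith (dl.drop i.toNat) cl) = [] := by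
          rw [List.filter_eq_nil_iff]
          intro i hi
          have hmem := PySem.List.mem_pyRange_one.mp hi
          rw [PySem.Chars.startswith_iff]
          intro hp
          exact hmin i.toNat (by omega) (by omega) (by
            have : (i.toNat : Int) = i := by omega
            rwa [] at hp)
        have hhit : PySem.Chars.startswith (dl.drop pos.toNat) cl = true :=
          (PySem.Chars.startswith_iff _ _).mpr hpre
        rw [hfilt1]
        simp only [hhit, if_true, List.nil_append, List.map_cons]
        congr 1
        have hcast : pos + 1 = ((pos.toNat + 1 : Nat) : Int) := by omega
        rw [hcast, ih (pos.toNat + 1) (by omega) (by omega)]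

-- ===== VERDICT (by name: the statement is the Claim_ definition above) =====
theorem extract_mention_context_spec : Claim_equal_extract_mention_context := by
  intro doc country cc _
  unfold Spec_extract_mention_context extract_mention_context extract_mention_context_alt
  simp only []
  have := emcLoopA_eq doc.toList (PySem.Chars.lower doc.toList)
      (PySem.Chars.lower country.toList) country.toList.length cc
      (by simp [PySem.Chars.lower]) (doc.toList.length + 2) 0 (by omega) (by omega)
  simpa using this
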